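-- pv_equiv track=rewrite | github.com/mars887/avi-boost-rework | utils/zone-editor.py | space_boundary_bars
-- ===== SOURCE A (Python) =====
-- from typing import Any, Dict, List, Optional, Sequence, Tuple
--
-- def space_boundary_bars(line: str) -> str:
--     out: List[str] = []
--     quote = ""
--     for ch in line:
--         if ch in ("'", '"'):
--             if quote == ch:
--                 quote = ""
--             elif not quote:
--                 quote = ch
--             out.append(ch)
--             continue
--         if ch == "|" and not quote:
--             out.append(" | ")
--             continue
--         out.append(ch)
--     return "".join(out)
-- ===== SOURCE B (Python) =====
-- def space_boundary_bars(line: str) -> str: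
--     # Jump-based tokenizer: skip whole quoted runs with str.find instead of
--     # tracking a per-character quote state.
--     out = []
--     i = 0
--     n = len(line)
--     while i < n:
--         ch = line[i]
--         if ch == "'" or ch == '"':
--             j = line.find(ch, i + 1)
--             if j == -1:
--                 out.append(line[i:])
--                 i = n
--             else:
--                 out.append(line[i:j + 1])
--                 i = j + 1
--         elif ch == "|":
--             out.append(" | ")
--             i += 1
--         else:
--             out.append(ch)
--             i += 1
--     return "".join(out)
-- ===== Notes on version B (the rewrite author's own statement) =====
-- stated objective: alternative
-- what changed: Replaced A's per-character quote-state machine (a flag toggled on every quote char) by a jump tokenizer that, on a quote char, finds the matching close quote with str.find and emits the whole quoted run as one token, padding only top-level pipes.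
import Mathlib
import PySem

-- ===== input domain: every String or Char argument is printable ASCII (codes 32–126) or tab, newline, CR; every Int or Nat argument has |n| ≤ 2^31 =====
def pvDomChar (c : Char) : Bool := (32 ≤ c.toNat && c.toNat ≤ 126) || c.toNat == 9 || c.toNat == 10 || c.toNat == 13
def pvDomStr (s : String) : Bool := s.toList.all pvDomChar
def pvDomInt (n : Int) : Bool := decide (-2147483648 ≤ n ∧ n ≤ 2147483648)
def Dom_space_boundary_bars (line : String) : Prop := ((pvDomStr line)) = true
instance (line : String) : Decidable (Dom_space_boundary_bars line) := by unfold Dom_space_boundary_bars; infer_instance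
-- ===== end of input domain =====

-- B replaces A's per-character quote-state machine by a jump tokenizer that skips
-- whole quoted runs at once (objective: alternative decomposition, same cost).

-- ===== PORT A =====
-- state: (out : list of appended chunks as char lists, quote : "" or the open quote char)
def pvStepA (st : List (List Char) × List Char) (ch : Char) : List (List Char) × List Char :=
  if ch = '\'' ∨ ch = '"' then
    (st.1 ++ [[ch]], if st.2 = [ch] then [] else if st.2 = [] then [ch] else st.2)
  else if ch = '|' ∧ st.2 = [] then
    (st.1 ++ [[' ', '|', ' ']], st.2)
  else
    (st.1 ++ [[ch]], st.2)

-- "".join(out) = flatten of the chunk lists, back to a String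
def space_boundary_bars (line : String) : String :=
  String.ofList (List.foldl pvStepA ([], []) line.toList).1.flatten

-- ===== PORT B =====
-- Source B's while loop: at a quote char, line.find(ch, i+1) is the first later occurrence;
-- on the remaining chars that is takeWhile/dropWhile (· ≠ c) — exact correspondence.
def pvTokB : List Char → List (List Char)
  | [] => []
  | c :: rest =>
    if c = '\'' ∨ c = '"' then
      match h : rest.dropWhile (· ≠ c) with
      | [] => [c :: rest]                                        -- unclosed: rest of the line
      | _ :: rest' => (c :: (rest.takeWhile (· ≠ c) ++ [c])) :: pvTokB rest'
    else if c = '|' then [' ', '|', ' '] :: pvTokB rest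
    else [c] :: pvTokB rest
termination_by l => l.length
decreasing_by
  · have hle : (rest.dropWhile (· ≠ c)).length ≤ rest.length := List.length_dropWhile_le _ _
    rw [h] at hle
    simp at hle ⊢
    omega
  · simp
  · simp

def space_boundary_bars_alt (line : String) : String :=
  String.ofList (pvTokB line.toList).flatten

-- ===== PRECONDITION & SPEC =====
def Spec_space_boundary_bars (line : String) (out : String) : Prop := out = space_boundary_bars_alt line
instance (line : String) (out : String) : Decidable (Spec_space_boundary_bars line out) := by unfold Spec_space_boundary_bars; infer_instance

-- ===== CLAIM (what is proved, stated in full; the proofs are below) =====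
def Claim_equal_space_boundary_bars : Prop := ∀ (line : String), Dom_space_boundary_bars line → Spec_space_boundary_bars line (space_boundary_bars line)

-- ===== LEMMAS AND PROOFS =====

theorem pvFlattenSingletons (l : List Char) : (l.map (fun x => [x])).flatten = l := by
  induction l with
  | nil => simp
  | cons a t ih => simp [ih]

-- A's loop in quoted mode: it copies characters verbatim until the matching quote,
-- which it appends and then returns to unquoted mode.
theorem pvStepA_quoted (q : Char) (hq : q = '\'' ∨ q = '"') :
    ∀ (cs : List Char) (out : List (List Char)),
      List.foldl pvStepA (out, [q]) cs =
        (match cs.dropWhile (· ≠ q) with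
         | [] => (out ++ cs.map ([·]), [q])
         | _ :: rest =>
             List.foldl pvStepA (out ++ (cs.takeWhile (· ≠ q)).map ([·]) ++ [[q]], []) rest) := by
  intro cs
  induction cs with
  | nil => intro out; simp
  | cons c cs ih =>
    intro out
    by_cases hc : c = q
    · subst hc
      have : pvStepA (out, [c]) c = (out ++ [[c]], []) := by
        simp [pvStepA, hq]
      simp [List.foldl_cons, this, List.dropWhile_cons, List.takeWhile_cons]
    · have hstep : pvStepA (out, [q]) c = (out ++ [[c]], [q]) := by
        by_cases hcq : c = '\'' ∨ c = '"'
        · have h1 : ¬([q] = [c]) := by simp [Ne.symm hc]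
          simp [pvStepA, hcq, h1]
        · simp [pvStepA, hcq]
      rw [List.foldl_cons, hstep, ih]
      cases hdw : cs.dropWhile (· ≠ q) with
      | nil =>
        simp only [ne_eq, decide_not] at hdw
        simp [hc, hdw]
      | cons x rest =>
        simp only [ne_eq, decide_not] at hdw
        simp [hc, hdw]

theorem pvMain : ∀ (cs : List Char) (out : List (List Char)),
    (List.foldl pvStepA (out, []) cs).1.flatten = out.flatten ++ (pvTokB cs).flatten := by
  intro cs
  induction cs using pvTokB.induct with
  | case1 => intro out; simp [pvTokB]
  | case2 c rest hq h =>
    -- quote char, unclosed (dropWhile = [])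
    intro out
    have hstep : pvStepA (out, []) c = (out ++ [[c]], [c]) := by simp [pvStepA, hq]
    rw [List.foldl_cons, hstep, pvStepA_quoted c hq rest, h]
    simp only [ne_eq] at h
    simp only [pvTokB, hq, if_true, or_true, true_or, if_pos]
    split
    · simp [pvFlattenSingletons]
    · next _ _ heq => rw [h] at heq; cases heq
  | case3 c rest hq x rest' h ih =>
    intro out
    have hstep : pvStepA (out, []) c = (out ++ [[c]], [c]) := by simp [pvStepA, hq]
    rw [List.foldl_cons, hstep, pvStepA_quoted c hq rest, h, ih]
    simp only [ne_eq] at h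
    simp only [pvTokB, hq, if_true, or_true, true_or, if_pos]
    split
    · next heq => rw [h] at heq; cases heq
    · next _ _ heq =>
        rw [h] at heq
        cases heq
        simp [pvFlattenSingletons]
  | case4 rest hq ih =>
    intro out
    have hstep : pvStepA (out, []) '|' = (out ++ [[' ', '|', ' ']], []) := by
      simp [pvStepA, hq]
    rw [List.foldl_cons, hstep, ih]
    simp [pvTokB, hq]
  | case5 c rest hq hbar ih =>
    intro out
    have hstep : pvStepA (out, []) c = (out ++ [[c]], []) := by simp [pvStepA, hq, hbar]
    rw [List.foldl_cons, hstep, ih]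
    simp [pvTokB, hq, hbar]

-- ===== VERDICT (by name: the statement is the Claim_ definition above) =====
theorem space_boundary_bars_spec : Claim_equal_space_boundary_bars := by
  intro line _
  unfold Spec_space_boundary_bars space_boundary_bars space_boundary_bars_alt
  rw [pvMain line.toList []]
  simp
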